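-- pv_equiv track=rewrite | github.com/Nicolas0016/Labo-Datos | tarea-procesamiento-datos/solucion.py | superanSalarioActividad04
-- ===== SOURCE A (Python) =====
-- def superanSalarioActividad04(empleados:list[list[int]], umbral:int):
--     empleados_que_superan = [[],[],[],[]]
--     for i in range(len(empleados[1])):
--         salario = empleados[1][i]
--         if(salario>umbral):
--             empleados_que_superan[0].append(empleados[0][i])
--             empleados_que_superan[1].append(empleados[1][i])
--             empleados_que_superan[2].append(empleados[2][i])
--             empleados_que_superan[3].append(empleados[3][i])
--     return empleados_que_superan
-- ===== SOURCE B (Python) =====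
-- def superanSalarioActividad04(empleados, umbral):
--     # Stage 1: scan only the salary column once, recording the kept row indices.
--     idxs = [i for i, s in enumerate(empleados[1]) if s > umbral]
--     # Stage 2: one independent gather pass per column.
--     out = [[], [], [], []]
--     for k, col in enumerate(empleados[:4]):
--         out[k] = [col[i] for i in idxs]
--     return out
-- ===== Notes on version B (the rewrite author's own statement) =====
-- stated objective: alternative
-- what changed: A makes one index-driven pass appending to four accumulators in lockstep; B is two-stage: it first scans only the salary column to build the list of kept row indices, then fills the result with one independent gather pass per column of empleados[:4].
import Mathlib
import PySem

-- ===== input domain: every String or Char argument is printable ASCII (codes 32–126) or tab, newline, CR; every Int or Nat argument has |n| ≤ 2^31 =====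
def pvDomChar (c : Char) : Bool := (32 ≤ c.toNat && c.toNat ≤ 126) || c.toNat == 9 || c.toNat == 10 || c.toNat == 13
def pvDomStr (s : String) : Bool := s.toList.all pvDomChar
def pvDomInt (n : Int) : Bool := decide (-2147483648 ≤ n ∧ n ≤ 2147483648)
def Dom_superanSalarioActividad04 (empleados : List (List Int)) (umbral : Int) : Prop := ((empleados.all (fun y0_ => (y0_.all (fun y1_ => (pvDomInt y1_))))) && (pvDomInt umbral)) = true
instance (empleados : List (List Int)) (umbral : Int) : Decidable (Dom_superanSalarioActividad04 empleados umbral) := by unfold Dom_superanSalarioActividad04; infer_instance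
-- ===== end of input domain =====

-- B replaces A's single loop with four lockstep appends by two stages: scan the salary
-- column once for the kept indices, then gather each column independently (alternative; same cost).


-- ===== PORT A =====
def superanSalarioActividad04 (empleados : List (List Int)) (umbral : Int) : List (List Int) :=
  let col0 := PySem.List.pyGetD empleados 0 []
  let col1 := PySem.List.pyGetD empleados 1 []
  let col2 := PySem.List.pyGetD empleados 2 []
  let col3 := PySem.List.pyGetD empleados 3 []
  let r := (PySem.List.pyRange 0 (col1.length : Int)).foldl
    (fun (acc : List Int × List Int × List Int × List Int) i =>
      let salario := PySem.List.pyGetD col1 i 0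
      if salario > umbral then
        (acc.1 ++ [PySem.List.pyGetD col0 i 0],
         acc.2.1 ++ [PySem.List.pyGetD col1 i 0],
         acc.2.2.1 ++ [PySem.List.pyGetD col2 i 0],
         acc.2.2.2 ++ [PySem.List.pyGetD col3 i 0])
      else acc)
    ([], [], [], [])
  [r.1, r.2.1, r.2.2.1, r.2.2.2]

-- ===== PORT B =====
def superanSalarioActividad04_alt (empleados : List (List Int)) (umbral : Int) : List (List Int) :=
  -- stage 1: kept row indices, from one scan of the salary column
  let idxs := ((PySem.List.enumerate (PySem.List.pyGetD empleados 1 []) 0).filter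
      (fun p => decide (p.2 > umbral))).map (fun p => p.1)
  -- stage 2: one gather pass per column of empleados[:4]
  (PySem.List.enumerate (PySem.List.slice empleados none (some 4)) 0).foldl
    (fun out kc => PySem.List.pySetD out kc.1 (idxs.map (fun i => PySem.List.pyGetD kc.2 i 0)))
    [[], [], [], []]

-- ===== PRECONDITION & SPEC =====
-- Pre_ is exactly the set of inputs on which the Python A returns normally: at least two
-- columns (A reads empleados[1] unconditionally, IndexError otherwise), and every index whose
-- salary exceeds the threshold lies inside columns 0, 2 and 3 of a table of at least four
-- columns (at a matching index A reads all four columns, IndexError otherwise).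
def Pre_superanSalarioActividad04 (empleados : List (List Int)) (umbral : Int) : Prop :=
  2 ≤ empleados.length ∧
  ∀ i : Nat, i < (empleados.getD 1 []).length → (empleados.getD 1 []).getD i 0 > umbral →
    (4 ≤ empleados.length ∧ i < (empleados.getD 0 []).length ∧
     i < (empleados.getD 2 []).length ∧ i < (empleados.getD 3 []).length)
instance (empleados : List (List Int)) (umbral : Int) : Decidable (Pre_superanSalarioActividad04 empleados umbral) := by unfold Pre_superanSalarioActividad04; infer_instance

def pvWitness_superanSalarioActividad04 : List (List Int) × Int :=
  ([[1, 2], [10, 0], [3, 4], [5, 6]], 5)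

def Spec_superanSalarioActividad04 (empleados : List (List Int)) (umbral : Int) (out : List (List Int)) : Prop := out = superanSalarioActividad04_alt empleados umbral
instance (empleados : List (List Int)) (umbral : Int) (out : List (List Int)) : Decidable (Spec_superanSalarioActividad04 empleados umbral out) := by unfold Spec_superanSalarioActividad04; infer_instance

-- ===== CLAIM (what is proved, stated in full; the proofs are below) =====
def Claim_equal_superanSalarioActividad04 : Prop := ∀ (empleados : List (List Int)) (umbral : Int), Dom_superanSalarioActividad04 empleados umbral → Pre_superanSalarioActividad04 empleados umbral → Spec_superanSalarioActividad04 empleados umbral (superanSalarioActividad04 empleados umbral)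

-- ===== LEMMAS AND PROOFS =====

-- A's loop, as selected indices mapped through each column.
theorem foldA_filter (u : Int) (c0 c1 c2 c3 : List Int) :
    ∀ (l : List Nat) (acc : List Int × List Int × List Int × List Int),
    l.foldl
      (fun acc i =>
        if c1.getD i 0 > u then
          (acc.1 ++ [c0.getD i 0], acc.2.1 ++ [c1.getD i 0],
           acc.2.2.1 ++ [c2.getD i 0], acc.2.2.2 ++ [c3.getD i 0])
        else acc) acc
    = (acc.1 ++ (l.filter (fun i => decide (c1.getD i 0 > u))).map (fun i => c0.getD i 0),
       acc.2.1 ++ (l.filter (fun i => decide (c1.getD i 0 > u))).map (fun i => c1.getD i 0),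
       acc.2.2.1 ++ (l.filter (fun i => decide (c1.getD i 0 > u))).map (fun i => c2.getD i 0),
       acc.2.2.2 ++ (l.filter (fun i => decide (c1.getD i 0 > u))).map (fun i => c3.getD i 0)) := by
  intro l
  induction l with
  | nil => intro acc; simp
  | cons j l ih =>
    intro acc
    simp only [List.foldl_cons, List.filter_cons]
    by_cases hj : c1.getD j 0 > u
    · rw [if_pos hj]
      rw [ih]
      simp only [List.getD_eq_getElem?_getD] at hj
      simp [hj, List.append_assoc]
    · rw [if_neg hj]
      rw [ih]
      simp only [List.getD_eq_getElem?_getD] at hj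
      simp [hj]

-- enumerate, written as an index range paired with getD lookups.
theorem enumerate_eq_range (xs : List Int) :
    ∀ (n : Nat), PySem.List.enumerate xs (n : Int)
      = (List.range xs.length).map (fun i => (((n + i : Nat) : Int), xs.getD i 0)) := by
  induction xs with
  | nil => intro n; simp [PySem.List.enumerate_nil]
  | cons x xs ih =>
    intro n
    rw [PySem.List.enumerate_cons]
    have : (n : Int) + 1 = ((n + 1 : Nat) : Int) := by push_cast; ring
    rw [this, ih (n + 1)]
    simp only [List.length_cons, List.range_succ_eq_map, List.map_cons, List.map_map]
    congr 1
    · simp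
      intro a _
      omega

-- B's stage 1: the kept indices are exactly A's selected indices, cast to Int.
theorem idxs_eq (u : Int) (c1 : List Int) :
    ((PySem.List.enumerate c1 0).filter (fun p => decide (p.2 > u))).map (fun p => p.1)
    = ((List.range c1.length).filter (fun i => decide (c1.getD i 0 > u))).map
        (fun i : Nat => (i : Int)) := by
  have h0 : (0 : Int) = ((0 : Nat) : Int) := rfl
  rw [h0, enumerate_eq_range c1 0]
  rw [List.filter_map, List.map_map]
  have h1 : ((fun p : Int × Int => decide (p.2 > u)) ∘
      fun i : Nat => (((0 + i : Nat) : Int), c1.getD i 0))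
      = fun i : Nat => decide (c1.getD i 0 > u) := by
    funext i; simp
  rw [h1]
  apply List.map_congr_left
  intro i _
  simp

-- Writing out[0..3] by four pySetD steps fills the four slots in order.
theorem setD4 (v0 v1 v2 v3 : List Int) :
    PySem.List.pySetD (PySem.List.pySetD (PySem.List.pySetD
      (PySem.List.pySetD ([[], [], [], []] : List (List Int)) (0 : Int) v0) 1 v1) 2 v2) 3 v3
    = [v0, v1, v2, v3] := by
  rfl

-- ===== VERDICT (by name: the statement is the Claim_ definition above) =====
theorem superanSalarioActividad04_spec : Claim_equal_superanSalarioActividad04 := by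
  intro e u _hd hpre
  obtain ⟨h2, hb⟩ := hpre
  unfold Spec_superanSalarioActividad04
  rcases e with _ | ⟨c0, e'⟩
  · simp at h2
  rcases e' with _ | ⟨c1, rest⟩
  · simp at h2
  have g0 : List.getD (c0 :: c1 :: rest) 0 ([] : List Int) = c0 := rfl
  have g1 : List.getD (c0 :: c1 :: rest) 1 ([] : List Int) = c1 := rfl
  have g2 : List.getD (c0 :: c1 :: rest) 2 ([] : List Int) = rest.getD 0 [] := rfl
  have g3 : List.getD (c0 :: c1 :: rest) 3 ([] : List Int) = rest.getD 1 [] := rfl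
  have hA : superanSalarioActividad04 (c0 :: c1 :: rest) u
      = [((List.range c1.length).filter (fun i => decide (c1.getD i 0 > u))).map
           (fun i => c0.getD i 0),
         ((List.range c1.length).filter (fun i => decide (c1.getD i 0 > u))).map
           (fun i => c1.getD i 0),
         ((List.range c1.length).filter (fun i => decide (c1.getD i 0 > u))).map
           (fun i => (rest.getD 0 []).getD i 0),
         ((List.range c1.length).filter (fun i => decide (c1.getD i 0 > u))).map
           (fun i => (rest.getD 1 []).getD i 0)] := by
    simp only [superanSalarioActividad04, PySem.List.pyGetD_ofNat', g0, g1, g2, g3]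
    rw [PySem.List.pyRange_zero_natCast, List.foldl_map]
    simp only [PySem.List.pyGetD_natCast]
    rw [foldA_filter u c0 c1 (rest.getD 0 []) (rest.getD 1 []) (List.range c1.length)
      ([], [], [], [])]
    simp
  rw [hA]
  simp only [superanSalarioActividad04_alt, PySem.List.pyGetD_ofNat', g1]
  rw [idxs_eq u c1]
  set F := (List.range c1.length).filter (fun i => decide (c1.getD i 0 > u)) with hF
  have hgather : ∀ c : List Int,
      (F.map (fun i : Nat => (i : Int))).map (fun i => PySem.List.pyGetD c i 0)
      = F.map (fun i => c.getD i 0) := by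
    intro c; rw [List.map_map]; simp
  have hslice : PySem.List.slice (c0 :: c1 :: rest) none (some 4) = (c0 :: c1 :: rest).take 4 := by
    rw [show (4 : Int) = ((4 : Nat) : Int) by norm_num, PySem.List.slice_to_natCast]
  rw [hslice]
  rcases rest with _ | ⟨c2, rest2⟩
  · -- only two columns: Pre_ forces F = []
    have hFnil : F = [] := by
      rw [hF, List.filter_eq_nil_iff]
      intro i hi
      simp only [List.mem_range] at hi
      by_contra hpi
      have hgt : c1.getD i 0 > u := of_decide_eq_true (by simpa using hpi)
      have := (hb i (by simpa [g1] using hi) (by simpa [g1] using hgt)).1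
      simp at this
    rw [hFnil]
    have htake2 : List.take 4 [c0, c1] = [c0, c1] := rfl
    rw [htake2]
    simp only [List.map_nil, PySem.List.enumerate_cons, PySem.List.enumerate_nil,
      List.foldl_cons, List.foldl_nil]
    decide
  rcases rest2 with _ | ⟨c3, rest'⟩
  · -- three columns: Pre_ forces F = []
    have hFnil : F = [] := by
      rw [hF, List.filter_eq_nil_iff]
      intro i hi
      simp only [List.mem_range] at hi
      by_contra hpi
      have hgt : c1.getD i 0 > u := of_decide_eq_true (by simpa using hpi)
      have := (hb i (by simpa [g1] using hi) (by simpa [g1] using hgt)).1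
      simp at this
    rw [hFnil]
    have htake3 : List.take 4 [c0, c1, c2] = [c0, c1, c2] := rfl
    rw [htake3]
    simp only [List.map_nil, PySem.List.enumerate_cons, PySem.List.enumerate_nil,
      List.foldl_cons, List.foldl_nil]
    decide
  · -- four (or more) columns: both sides are the four gathered columns
    have htake : (c0 :: c1 :: c2 :: c3 :: rest').take 4 = [c0, c1, c2, c3] := rfl
    rw [htake]
    simp only [PySem.List.enumerate_cons, PySem.List.enumerate_nil, List.foldl_cons,
      List.foldl_nil]
    norm_num only
    rw [setD4, hgather c0, hgather c1, hgather c2, hgather c3]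
    simp
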